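-- pv_equiv track=rewrite | github.com/texttechnologylab/Logical-Document-Structure | src/runner.py | expand_parameter
-- ===== SOURCE A (Python) =====
-- import itertools
-- from collections import defaultdict
--
-- def expand_parameter(parameters):
--     result = defaultdict(list)
--     repeatlength= len(parameters)
--     product = list(itertools.product(*list(parameters)))
--     for i,parametertuple in enumerate(product):
--         for j,parameter in enumerate(parametertuple):
--             result.setdefault(j, []).append(parameter)
--     return tuple(result.values())
--
-- result = ["modelname,eval"]
-- ===== SOURCE B (Python) =====
-- def expand_parameter(parameters):
--     params = [list(p) for p in parameters]
--     if any(not p for p in params):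
--         return ()
--
--     def cols(ps):
--         # returns (list of transposed columns of product(*ps), product of the lengths)
--         if not ps:
--             return [], 1
--         rest, t = cols(ps[1:])
--         first = [x for x in ps[0] for _ in range(t)]
--         return [first] + [c * len(ps[0]) for c in rest], t * len(ps[0])
--
--     return tuple(cols(params)[0])
-- ===== Notes on version B (the rewrite author's own statement) =====
-- stated objective: alternative
-- what changed: Builds each transposed column directly by a structural recursion (repeat each element, tile each inner column) instead of materialising the full itertools.product tuple list and scattering it into a dict of columns.
import Mathlib
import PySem

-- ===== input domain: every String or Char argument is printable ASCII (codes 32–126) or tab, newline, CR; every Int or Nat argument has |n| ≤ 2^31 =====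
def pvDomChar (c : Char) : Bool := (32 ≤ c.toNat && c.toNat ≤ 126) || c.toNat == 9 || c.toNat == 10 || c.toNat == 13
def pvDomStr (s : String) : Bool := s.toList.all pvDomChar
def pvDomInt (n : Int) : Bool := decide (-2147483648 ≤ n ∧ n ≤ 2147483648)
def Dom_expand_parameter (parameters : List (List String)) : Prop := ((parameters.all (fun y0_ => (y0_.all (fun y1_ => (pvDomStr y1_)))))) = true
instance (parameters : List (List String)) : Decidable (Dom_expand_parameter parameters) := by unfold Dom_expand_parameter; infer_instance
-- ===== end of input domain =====

-- B transposes the cartesian product by a structural recursion (repeat/tile each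
-- parameter list) instead of materialising itertools.product and scattering it into a dict.

-- ===== PORT A =====
-- itertools.product(*parameters): right component varies fastest
def pvProd (parameters : List (List String)) : List (List String) :=
  match parameters with
  | [] => [[]]
  | p :: ps => p.flatMap (fun x => (pvProd ps).map (x :: ·))

def expand_parameter (parameters : List (List String)) : List (List String) :=
  -- result = defaultdict(list); repeatlength = len(parameters) is bound by A and never used
  -- product = list(itertools.product(*list(parameters)))
  -- for i, parametertuple in enumerate(product): for j, parameter in enumerate(parametertuple):
  --   result.setdefault(j, []).append(parameter)   -- = result[j] = result.get(j, []) + [parameter]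
  -- return tuple(result.values())
  ((PySem.List.enumerate (pvProd parameters)).foldl
      (fun d ip => (PySem.List.enumerate ip.2).foldl
        (fun d jp => d.modify jp.1 [] (fun l => l ++ [jp.2])) d)
      (PySem.Dict.empty : PySem.Dict Int (List String))).values

-- ===== PORT B =====
-- cols ps = (transposed columns of product(*ps), product of the lengths of ps)
def pvColsB (ps : List (List String)) : (List (List String)) × Nat :=
  match ps with
  | [] => ([], 1)
  | p :: ps' =>
    let r := pvColsB ps'
    ((p.flatMap (fun x => List.replicate r.2 x)) ::
       r.1.map (fun c => (List.replicate p.length c).flatten),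
     r.2 * p.length)

def expand_parameter_alt (parameters : List (List String)) : List (List String) :=
  if parameters.any (fun p => p.isEmpty) then []
  else (pvColsB parameters).1

-- ===== PRECONDITION & SPEC =====
def Spec_expand_parameter (parameters : List (List String)) (out : List (List String)) : Prop := out = expand_parameter_alt parameters
instance (parameters : List (List String)) (out : List (List String)) : Decidable (Spec_expand_parameter parameters out) := by unfold Spec_expand_parameter; infer_instance

-- ===== CLAIM (what is proved, stated in full; the proofs are below) =====
def Claim_equal_expand_parameter : Prop := ∀ (parameters : List (List String)), Dom_expand_parameter parameters → Spec_expand_parameter parameters (expand_parameter parameters)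

-- ===== LEMMAS AND PROOFS =====

-- the double enumerate-fold of A is a single fold over the flattened enumerated pairs
theorem fold_enum_flat (ts : List (List String)) (s : Int)
    (d : PySem.Dict Int (List String)) :
    (PySem.List.enumerate ts s).foldl
      (fun d ip =>
        (PySem.List.enumerate ip.2).foldl
          (fun d jp => d.modify jp.1 [] (fun l => l ++ [jp.2])) d) d
    = (ts.flatMap (fun t => PySem.List.enumerate t)).foldl
        (fun d jp => d.modify jp.1 [] (fun l => l ++ [jp.2])) d := by
  induction ts generalizing s d with
  | nil => simp [PySem.List.enumerate]
  | cons t ts ih =>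
      simp only [PySem.List.enumerate_cons, List.foldl_cons, List.flatMap_cons,
        List.foldl_append]
      exact ih (s + 1) _

-- every tuple of the product has length `parameters.length`, and the product is
-- empty exactly when some parameter list is empty
theorem pvProd_length_mem (ps : List (List String)) :
    ∀ t ∈ pvProd ps, t.length = ps.length := by
  induction ps with
  | nil => simp [pvProd]
  | cons p ps ih =>
      intro t ht
      simp only [pvProd, List.mem_flatMap, List.mem_map] at ht
      obtain ⟨x, -, u, hu, rfl⟩ := ht
      simp [ih u hu]

theorem pvProd_eq_nil_iff (ps : List (List String)) :
    pvProd ps = [] ↔ ps.any (fun p => p.isEmpty) = true := by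
  induction ps with
  | nil => simp [pvProd]
  | cons p ps ih =>
      simp only [pvProd, List.any_cons, List.flatMap_eq_nil_iff, List.map_eq_nil_iff]
      constructor
      · intro h
        by_cases hp : p = []
        · simp [hp]
        · obtain ⟨x, hx⟩ := List.exists_mem_of_ne_nil p hp
          simp [ih.mp (h x hx)]
      · intro h
        rcases Bool.or_eq_true_iff.mp h with h | h
        · intro x hx; exact absurd hx (by simp [List.isEmpty_iff.mp h])
        · intro x _; exact ih.mpr h

-- the second component of pvColsB is the length of the product
theorem pvColsB_snd (ps : List (List String)) :
    (pvColsB ps).2 = (pvProd ps).length := by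
  induction ps with
  | nil => simp [pvColsB, pvProd]
  | cons p ps ih =>
      simp [pvColsB, pvProd, ih, List.length_flatMap, Nat.mul_comm,
        List.map_const', List.sum_replicate, smul_eq_mul]

-- filter of an enumeration at one index picks out exactly that element
theorem enum_filter_map (t : List String) (s : Int) (j : Nat) (hj : j < t.length) :
    ((PySem.List.enumerate t s).filter (fun p => p.1 == s + (j : Int))).map (·.2)
      = [t.getD j ""] := by
  induction t generalizing s j with
  | nil => simp at hj
  | cons x t ih =>
      cases j with
      | zero =>
          have hnil : ((PySem.List.enumerate t (s + 1)).filter (fun p => p.1 == s)) = [] := by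
            apply List.filter_eq_nil_iff.mpr
            intro p hp
            obtain ⟨k, hk, rfl⟩ := (PySem.List.mem_enumerate_iff t (s+1) p).mp hp
            simp; omega
          simp [PySem.List.enumerate_cons, hnil]
      | succ j =>
          have hj' : j < t.length := by simpa using hj
          have hcast : ((j + 1 : Nat) : Int) = (j : Int) + 1 := by push_cast; ring
          simp only [PySem.List.enumerate_cons, List.filter_cons, hcast]
          have hne : (s == s + ((j : Int) + 1)) = false := by simp; omega
          rw [hne]
          simp only [Bool.false_eq_true, if_false]
          have h := ih (s + 1) j hj'
          rw [show s + ((j : Int) + 1) = (s + 1) + (j : Int) by ring]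
          simpa [List.getD_cons_succ] using h

-- flatMap of a constant is a flattened replicate
theorem flatMap_const {α β : Type} (l : List α) (L : List β) :
    l.flatMap (fun _ => L) = (List.replicate l.length L).flatten := by
  induction l with
  | nil => simp
  | cons a l ih => simp [ih, List.replicate_succ]

-- column j of the product, extracted tuple-by-tuple, equals pvColsB's j-th column
theorem pvColsB_fst (ps : List (List String)) :
    (pvColsB ps).1
      = (List.range ps.length).map (fun j => (pvProd ps).map (fun t => t.getD j "")) := by
  induction ps with
  | nil => simp [pvColsB, pvProd]
  | cons p ps ih =>
      simp only [pvColsB, pvProd, List.length_cons, List.range_succ_eq_map,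
        List.map_cons, List.map_map]
      rw [List.cons_eq_cons]
      constructor
      · rw [pvColsB_snd]
        simp [List.map_flatMap, List.map_map, Function.comp_def, List.map_const']
      · rw [ih]
        simp only [List.map_map]
        congr 1
        funext j
        simp only [Function.comp_def, List.map_flatMap, List.map_map, Nat.succ_eq_add_one]
        rw [← flatMap_const p ((pvProd ps).map (fun t => t.getD j ""))]
        congr 1

-- a nonempty flatMap of one constant nodup list dedups to that list
theorem ofList_flatMap_const {α : Type} (P : List α) (R : List Int)
    (hP : P ≠ []) (hR : R.Nodup) :
    PySem.Set.ofList (P.flatMap (fun _ => R)) = R := by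
  cases P with
  | nil => exact absurd rfl hP
  | cons t P' =>
      rw [List.flatMap_cons, PySem.Set.ofList_append,
        PySem.Set.ofList_eq_self_of_nodup R hR, PySem.Set.update_eq_append_filter]
      have hnil : (PySem.Set.ofList (P'.flatMap (fun _ => R))).filter
          (fun y => !PySem.Set.contains R y) = [] := by
        apply List.filter_eq_nil_iff.mpr
        intro y hy
        obtain ⟨x, -, hyR⟩ := List.mem_flatMap.mp ((PySem.Set.mem_ofList _ _).mp hy)
        simpa using hyR
      rw [hnil, List.append_nil]

-- A's result, characterised: the columns of the product in index order
theorem A_char (ps : List (List String)) (hne : pvProd ps ≠ []) :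
    expand_parameter ps
      = (List.range ps.length).map (fun j => (pvProd ps).map (fun t => t.getD j "")) := by
  unfold expand_parameter
  rw [fold_enum_flat (pvProd ps) 0]
  have hD := PySem.Dict.keys_foldl_modify_key
    ((pvProd ps).flatMap (fun t => PySem.List.enumerate t)) (fun p => p.1) []
    (fun _ jp l => l ++ [jp.2]) PySem.Dict.empty
  simp only [] at hD
  have hmapfst : ((pvProd ps).flatMap (fun t => PySem.List.enumerate t)).map (fun p => p.1)
      = (pvProd ps).flatMap (fun _ => PySem.List.pyRange 0 (ps.length : Int)) := by
    rw [List.map_flatMap]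
    apply List.flatMap_congr
    intro t ht
    rw [PySem.List.map_fst_enumerate t 0, zero_add, pvProd_length_mem ps t ht]
  have hkeys : ((((pvProd ps).flatMap (fun t => PySem.List.enumerate t)).foldl
        (fun d jp => d.modify jp.1 [] (fun l => l ++ [jp.2])) PySem.Dict.empty)).keys
      = PySem.List.pyRange 0 (ps.length : Int) := by
    rw [hD, PySem.Dict.keys_empty, PySem.Set.update_nil_left, hmapfst]
    exact ofList_flatMap_const (pvProd ps) _ hne (PySem.List.nodup_pyRange_one 0 _)
  have hnd : ((((pvProd ps).flatMap (fun t => PySem.List.enumerate t)).foldl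
        (fun d jp => d.modify jp.1 [] (fun l => l ++ [jp.2])) PySem.Dict.empty)).keys.Nodup := by
    rw [hkeys]; exact PySem.List.nodup_pyRange_one 0 _
  rw [PySem.Dict.values_eq_map_keys _ hnd [], hkeys, PySem.List.pyRange_zero_nat, List.map_map]
  apply List.map_congr_left
  intro j hj
  have hjlt : j < ps.length := List.mem_range.mp hj
  rw [Function.comp_apply, PySem.Dict.getD_foldl_modify_append, PySem.Dict.getD_empty,
    List.nil_append, List.filter_flatMap, List.map_flatMap]
  have hcol : ∀ t ∈ pvProd ps,
      ((PySem.List.enumerate t).filter (fun p => p.1 == (j : Int))).map (fun p => p.2)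
        = [t.getD j ""] := by
    intro t ht
    have h := enum_filter_map t 0 j (by rw [pvProd_length_mem ps t ht]; exact hjlt)
    rwa [zero_add] at h
  rw [List.flatMap_congr hcol]
  exact List.map_eq_flatMap.symm

-- ===== VERDICT (by name: the statement is the Claim_ definition above) =====
theorem expand_parameter_spec : Claim_equal_expand_parameter := by
  intro ps _
  unfold Spec_expand_parameter expand_parameter_alt
  by_cases h : ps.any (fun p => p.isEmpty) = true
  · have hnil : pvProd ps = [] := (pvProd_eq_nil_iff ps).mpr h
    simp [expand_parameter, hnil, h, PySem.List.enumerate_nil, PySem.Dict.values,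
      PySem.Dict.empty]
  · have hne : pvProd ps ≠ [] := fun hc => h ((pvProd_eq_nil_iff ps).mp hc)
    rw [A_char ps hne, if_neg h, pvColsB_fst]
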